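-- pv_equiv track=rewrite | github.com/TaffetaEarth/homework_python | Algorithms/2511.py | sort_choice_letters
-- ===== SOURCE A (Python) =====
-- def sort_choice_letters(stroka):
--     nums = []
--     for k in range(len(stroka)):
--         nums.append(stroka[k])
--     for l in nums:
--         if l.isdigit() or l.isalpha():
--             continue
--         else:
--             return "Err"
--     for i in range(len(nums)):
--         for j in range(i, len(nums)):
--             if ord(nums[i]) > ord(nums[j]):
--                 nums[i], nums[j] = nums[j], nums[i]
--     return "".join(nums)
-- ===== SOURCE B (Python) =====
-- def sort_choice_letters(stroka):
--     # validate: first non-alphanumeric character means "Err"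
--     for c in stroka:
--         if not (c.isdigit() or c.isalpha()):
--             return "Err"
--     # counting sort: bucket each character's multiplicity ...
--     counts = {}
--     for c in stroka:
--         counts[c] = counts.get(c, 0) + 1
--     # ... then expand the distinct characters in ascending order
--     out = []
--     for c in sorted(counts):
--         out.append(c * counts[c])
--     return "".join(out)
-- ===== Notes on version B (the rewrite author's own statement) =====
-- stated objective: faster
-- what changed: Replaced the index-copy loop plus quadratic exchange sort with a single validation pass and a counting sort: a frequency dict built once, then the distinct characters expanded by multiplicity in ascending order.
import Mathlib
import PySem

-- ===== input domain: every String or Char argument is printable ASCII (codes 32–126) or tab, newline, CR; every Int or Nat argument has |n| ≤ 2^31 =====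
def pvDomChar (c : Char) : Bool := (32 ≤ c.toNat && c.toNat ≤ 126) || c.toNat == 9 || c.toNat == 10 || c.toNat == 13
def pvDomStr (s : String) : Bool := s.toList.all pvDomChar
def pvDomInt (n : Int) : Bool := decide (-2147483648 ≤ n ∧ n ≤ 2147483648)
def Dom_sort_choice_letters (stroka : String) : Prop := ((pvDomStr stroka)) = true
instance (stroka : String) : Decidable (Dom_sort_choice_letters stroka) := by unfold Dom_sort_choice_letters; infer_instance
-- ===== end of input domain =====

-- B replaces A's index-copy loop and quadratic exchange sort by one validation pass plus a
-- counting sort (frequency dict, then expansion of the distinct characters in ascending order).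

-- ===== PORT A =====
-- "for l in nums: if l.isdigit() or l.isalpha(): continue else: return 'Err'" — true ⇔ the loop falls through
def pvCheckA : List Char → Bool
  | [] => true
  | c :: cs => if PySem.Chars.isdigit c || PySem.Chars.isalpha c then pvCheckA cs else false

-- the inner "for j in range(i, len(nums))" loop of A's exchange sort ("ord(x) > ord(y)" is x.toNat > y.toNat)
def pvInnerA (i : Int) (ns : List Char) : List Char :=
  (PySem.List.pyRange i (PySem.List.len ns)).foldl
    (fun ms j =>
      if (PySem.List.pyGetD ms i ' ').toNat > (PySem.List.pyGetD ms j ' ').toNat then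
        PySem.List.pySetD (PySem.List.pySetD ms i (PySem.List.pyGetD ms j ' ')) j
          (PySem.List.pyGetD ms i ' ')
      else ms)
    ns

def sort_choice_letters (stroka : String) : String :=
  -- nums = []; for k in range(len(stroka)): nums.append(stroka[k])
  let nums := (PySem.List.pyRange 0 (PySem.Str.len stroka)).foldl
    (fun acc k => acc ++ [PySem.List.pyGetD stroka.toList k ' ']) []
  if pvCheckA nums then
    -- for i in range(len(nums)): for j in range(i, len(nums)): swap when ord(nums[i]) > ord(nums[j])
    let nums2 := (PySem.List.pyRange 0 (PySem.List.len nums)).foldl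
      (fun ns i => pvInnerA i ns) nums
    String.ofList nums2      -- "".join of the one-character strings
  else "Err"

-- ===== PORT B =====
def sort_choice_letters_alt (stroka : String) : String :=
  -- for c in stroka: if not (c.isdigit() or c.isalpha()): return "Err"
  if stroka.toList.all (fun c => PySem.Chars.isdigit c || PySem.Chars.isalpha c) then
    -- counts[c] = counts.get(c, 0) + 1
    let counts : PySem.Dict Char Int :=
      stroka.toList.foldl (fun d c => d.insert c (d.getD c 0 + 1)) PySem.Dict.empty
    -- for c in sorted(counts): out.append(c * counts[c])   (c * n is n copies of c)
    let out : List (List Char) :=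
      (PySem.List.sorted counts.keys (fun c => c)).foldl
        (fun acc c => acc ++ [List.replicate (counts.getD c 0).toNat c]) []
    String.ofList out.flatten      -- "".join(out)
  else "Err"

-- ===== PRECONDITION & SPEC =====
def Spec_sort_choice_letters (stroka : String) (out : String) : Prop := out = sort_choice_letters_alt stroka
instance (stroka : String) (out : String) : Decidable (Spec_sort_choice_letters stroka out) := by unfold Spec_sort_choice_letters; infer_instance

-- ===== CLAIM (what is proved, stated in full; the proofs are below) =====
def Claim_equal_sort_choice_letters : Prop := ∀ (stroka : String), Dom_sort_choice_letters stroka → Spec_sort_choice_letters stroka (sort_choice_letters stroka)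

-- ===== LEMMAS AND PROOFS =====

-- A's first loop copies the string, character by character
theorem pvNums_eq (s : String) :
    (PySem.List.pyRange 0 (PySem.Str.len s)).foldl
      (fun acc k => acc ++ [PySem.List.pyGetD s.toList k ' ']) [] = s.toList := by
  rw [PySem.Str.len_eq, PySem.List.pyRange_zero_natCast, List.foldl_map]
  simp only [PySem.List.pyGetD_natCast, PySem.List.foldl_append_singleton_eq_map]
  simp only [List.nil_append]
  apply List.ext_getElem (by simp)
  intro i h1 h2
  simp [List.getD, List.getElem?_eq_getElem h2]

-- A's validation loop is the "all characters alphanumeric" test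
theorem pvCheckA_eq (l : List Char) :
    pvCheckA l = l.all (fun c => PySem.Chars.isdigit c || PySem.Chars.isalpha c) := by
  induction l with
  | nil => rfl
  | cons c cs ih => by_cases h : (PySem.Chars.isdigit c || PySem.Chars.isalpha c) = true <;>
      simp [pvCheckA, h, ih]

-- Nat-indexed form of one comparison/swap step of A's exchange sort
def pvStepN (i j : Nat) (ms : List Char) : List Char :=
  if (ms.getD j ' ').toNat < (ms.getD i ' ').toNat then
    (ms.set i (ms.getD j ' ')).set j (ms.getD i ' ')
  else ms

theorem pvGetD_set_ne (l : List Char) (i k : Nat) (v : Char) (h : k ≠ i) :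
    (l.set i v).getD k ' ' = l.getD k ' ' := by
  simp [List.getD, List.getElem?_set_ne (by omega : i ≠ k)]

theorem pvGetD_set_self (l : List Char) (i : Nat) (v : Char) (h : i < l.length) :
    (l.set i v).getD i ' ' = v := by
  simp [List.getD, h]

theorem pvConsSwap (l : List Char) (m : Nat) (hm : m < l.length) (b : Char) :
    (l.getD m ' ' :: l.set m b).Perm (b :: l) := by
  induction l generalizing m with
  | nil => simp at hm
  | cons a l ih =>
    cases m with
    | zero => simpa using List.Perm.swap b a l
    | succ m =>
      simp only [List.getD_cons_succ, List.set_cons_succ]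
      exact (List.Perm.swap a _ _).trans (((ih m (by simpa using hm)).cons a).trans
        (List.Perm.swap b a l))

-- exchanging two positions is a permutation
theorem pvPermSetSet (l : List Char) (i j : Nat) (hi : i < l.length) (hj : j < l.length) :
    ((l.set i (l.getD j ' ')).set j (l.getD i ' ')).Perm l := by
  induction l generalizing i j with
  | nil => simp at hi
  | cons a l ih =>
    cases i with
    | zero =>
      cases j with
      | zero => simp
      | succ m =>
        simp only [List.getD_cons_zero, List.getD_cons_succ, List.set_cons_zero, List.set_cons_succ]
        exact pvConsSwap l m (by simpa using hj) a
    | succ n =>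
      cases j with
      | zero =>
        simp only [List.getD_cons_zero, List.getD_cons_succ, List.set_cons_zero, List.set_cons_succ]
        exact pvConsSwap l n (by simpa using hi) a
      | succ m =>
        simp only [List.getD_cons_succ, List.set_cons_succ]
        exact (ih n m (by simpa using hi) (by simpa using hj)).cons a

theorem pvStep_facts (i j : Nat) (ms : List Char) (hi : i < ms.length) (hj : j < ms.length) :
    (pvStepN i j ms).length = ms.length ∧
    (∀ k, k ≠ i → k ≠ j → (pvStepN i j ms).getD k ' ' = ms.getD k ' ') ∧
    (pvStepN i j ms).Perm ms ∧
    ((pvStepN i j ms).getD i ' ').toNat ≤ (ms.getD i ' ').toNat ∧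
    ((pvStepN i j ms).getD i ' ').toNat ≤ ((pvStepN i j ms).getD j ' ').toNat := by
  unfold pvStepN
  by_cases h : (ms.getD j ' ').toNat < (ms.getD i ' ').toNat
  · rw [if_pos h]
    have hij : i ≠ j := by rintro rfl; omega
    have hgi : ((ms.set i (ms.getD j ' ')).set j (ms.getD i ' ')).getD i ' ' = ms.getD j ' ' := by
      rw [pvGetD_set_ne _ _ _ _ hij, pvGetD_set_self _ _ _ hi]
    have hgj : ((ms.set i (ms.getD j ' ')).set j (ms.getD i ' ')).getD j ' ' = ms.getD i ' ' := by
      rw [pvGetD_set_self]; simpa using hj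
    refine ⟨by simp, ?_, pvPermSetSet ms i j hi hj, ?_, ?_⟩
    · intro k hki hkj
      rw [pvGetD_set_ne _ _ _ _ hkj, pvGetD_set_ne _ _ _ _ hki]
    · rw [hgi]; omega
    · rw [hgi, hgj]; omega
  · rw [if_neg h]
    exact ⟨rfl, fun _ _ _ => rfl, List.Perm.refl ms, le_refl _, by omega⟩

-- inner-loop invariant: other positions are only touched at their own round; the value at i
-- only decreases and ends up ≤ every processed position
theorem pvInner_go (i : Nat) (js : List Nat) : ∀ (ms : List Char),
    i < ms.length → (∀ j ∈ js, j < ms.length) → js.Pairwise (· < ·) →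
    (js.foldl (fun ms j => pvStepN i j ms) ms).length = ms.length ∧
    (∀ k, k ≠ i → k ∉ js →
      (js.foldl (fun ms j => pvStepN i j ms) ms).getD k ' ' = ms.getD k ' ') ∧
    (js.foldl (fun ms j => pvStepN i j ms) ms).Perm ms ∧
    ((js.foldl (fun ms j => pvStepN i j ms) ms).getD i ' ').toNat ≤ (ms.getD i ' ').toNat ∧
    (∀ j ∈ js, ((js.foldl (fun ms j => pvStepN i j ms) ms).getD i ' ').toNat ≤
      ((js.foldl (fun ms j => pvStepN i j ms) ms).getD j ' ').toNat) := by
  induction js with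
  | nil => intro ms hi _ _; exact ⟨rfl, fun _ _ _ => rfl, List.Perm.refl ms, le_refl _, by simp⟩
  | cons j rest ih =>
    intro ms hi hb hp
    have hj : j < ms.length := hb j (by simp)
    obtain ⟨s1, s2, s3, s4, s5⟩ := pvStep_facts i j ms hi hj
    have hi' : i < (pvStepN i j ms).length := by omega
    have hb' : ∀ j' ∈ rest, j' < (pvStepN i j ms).length := by
      intro j' hj'; rw [s1]; exact hb j' (by simp [hj'])
    obtain ⟨r1, r2, r3, r4, r5⟩ := ih (pvStepN i j ms) hi' hb' hp.of_cons
    have hfold : (j :: rest).foldl (fun ms j => pvStepN i j ms) ms =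
        rest.foldl (fun ms j => pvStepN i j ms) (pvStepN i j ms) := rfl
    rw [hfold]
    refine ⟨by omega, ?_, r3.trans s3, by omega, ?_⟩
    · intro k hki hk
      rw [r2 k hki (fun h => hk (by simp [h])), s2 k hki (fun h => hk (by simp [h]))]
    · intro j' hj'
      rcases List.mem_cons.mp hj' with rfl | hmem
      · by_cases hji : j' = i
        · subst hji; omega
        · have hnot : j' ∉ rest := by
            intro hmem
            exact absurd (List.rel_of_pairwise_cons hp hmem) (lt_irrefl j')
          rw [r2 j' hji hnot]
          omega
      · exact r5 j' hmem

-- outer-loop invariant: after rounds 0..m-1 every position below m is ≤ everything to its right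
theorem pvOuter_go (orig : List Char) (fuel : Nat) : ∀ (m : Nat) (ws : List Char),
    ws.length - m ≤ fuel → ws.Perm orig →
    (∀ p q, p < q → q < ws.length → p < m → (ws.getD p ' ').toNat ≤ (ws.getD q ' ').toNat) →
    ((List.range' m (ws.length - m)).foldl
        (fun ns i => (List.range' i (ns.length - i)).foldl (fun ms j => pvStepN i j ms) ns) ws).Perm orig ∧
    (∀ p q, p < q →
      q < ((List.range' m (ws.length - m)).foldl
        (fun ns i => (List.range' i (ns.length - i)).foldl (fun ms j => pvStepN i j ms) ns) ws).length →
      (((List.range' m (ws.length - m)).foldl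
        (fun ns i => (List.range' i (ns.length - i)).foldl (fun ms j => pvStepN i j ms) ns) ws).getD p ' ').toNat ≤
      (((List.range' m (ws.length - m)).foldl
        (fun ns i => (List.range' i (ns.length - i)).foldl (fun ms j => pvStepN i j ms) ns) ws).getD q ' ').toNat) := by
  induction fuel with
  | zero =>
    intro m ws hf hperm hsort
    have h0 : ws.length - m = 0 := by omega
    rw [h0]
    simp only [List.range'_zero, List.foldl_nil]
    exact ⟨hperm, fun p q hpq hq => hsort p q hpq hq (by omega)⟩
  | succ fuel ih =>
    intro m ws hf hperm hsort
    by_cases hm : m < ws.length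
    · have hrng : List.range' m (ws.length - m) = m :: List.range' (m+1) (ws.length - (m+1)) := by
        have h1 : ws.length - m = (ws.length - (m+1)) + 1 := by omega
        rw [h1, List.range'_succ]
      set ws' := (List.range' m (ws.length - m)).foldl (fun ms j => pvStepN m j ms) ws with hws'
      have hbnd : ∀ j ∈ List.range' m (ws.length - m), j < ws.length := by
        intro j hj; have := List.mem_range'_1.mp hj; omega
      have hpw : (List.range' m (ws.length - m)).Pairwise (· < ·) := List.pairwise_lt_range' 1
      obtain ⟨r1, r2, r3, r4, r5⟩ := pvInner_go m (List.range' m (ws.length - m)) ws hm hbnd hpw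
      rw [← hws'] at r1 r2 r3 r4 r5
      have hpre : ∀ k, k < m → ws'.getD k ' ' = ws.getD k ' ' := fun k hk =>
        r2 k (by omega) (fun hmem => by have := List.mem_range'_1.mp hmem; omega)
      have hsuf : ∀ q, m ≤ q → q < ws'.length →
          ∃ q', m ≤ q' ∧ q' < ws.length ∧ ws'.getD q ' ' = ws.getD q' ' ' := by
        intro q hmq hql
        have htake : ws'.take m = ws.take m := by
          apply List.ext_getElem (by simp; omega)
          intro k h1 h2
          have hk : k < m := by simp at h1; omega
          have hkw : k < ws.length := by omega
          have hkw' : k < ws'.length := by omega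
          have := hpre k hk
          rw [List.getD_eq_getElem _ _ hkw', List.getD_eq_getElem _ _ hkw] at this
          simpa [List.getElem_take] using this
        have hdrop : (ws'.drop m).Perm (ws.drop m) := by
          have hp2 : (ws'.take m ++ ws'.drop m).Perm (ws.take m ++ ws.drop m) := by
            simpa using r3
          rw [htake] at hp2
          exact (List.perm_append_left_iff _).mp hp2
        have hql2 : q - m < (ws'.drop m).length := by simp; omega
        have hmem : ws'.getD q ' ' ∈ ws.drop m := by
          have hv : ws'.getD q ' ' = (ws'.drop m)[q - m] := by
            rw [List.getElem_drop, List.getD_eq_getElem _ _ hql]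
            congr 1; omega
          rw [hv]
          exact hdrop.mem_iff.mp (List.getElem_mem hql2)
        obtain ⟨t, ht, hteq⟩ := List.mem_iff_getElem.mp hmem
        refine ⟨m + t, by omega, by simp at ht; omega, ?_⟩
        rw [← hteq, List.getElem_drop, List.getD_eq_getElem]
      have hlen' : ws'.length = ws.length := r1
      have hsort' : ∀ p q, p < q → q < ws'.length → p < m + 1 →
          (ws'.getD p ' ').toNat ≤ (ws'.getD q ' ').toNat := by
        intro p q hpq hql hpm
        by_cases hp : p < m
        · rw [hpre p hp]
          by_cases hq : q < m
          · rw [hpre q hq]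
            exact hsort p q hpq (by omega) hp
          · obtain ⟨q', hq1, hq2, hq3⟩ := hsuf q (by omega) hql
            rw [hq3]
            exact hsort p q' (by omega) hq2 hp
        · have hpm' : p = m := by omega
          subst hpm'
          exact r5 q (List.mem_range'_1.mpr ⟨by omega, by omega⟩)
      obtain ⟨f1, f2⟩ := ih (m+1) ws' (by omega) (r3.trans hperm) hsort'
      rw [hlen'] at f1 f2
      rw [hrng, List.foldl_cons]
      exact ⟨f1, f2⟩
    · have h0 : ws.length - m = 0 := by omega
      rw [h0]
      simp only [List.range'_zero, List.foldl_nil]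
      exact ⟨hperm, fun p q hpq hq => hsort p q hpq hq (by omega)⟩

theorem pvRange_cast (i n : Nat) :
    PySem.List.pyRange (i : Int) (n : Int) = (List.range' i (n - i)).map (fun (k : Nat) => (k : Int)) := by
  rw [PySem.List.pyRange_of_pos (i : Int) (n : Int) Int.one_pos]
  by_cases h : i < n
  · rw [if_pos (by exact_mod_cast h)]
    have h2 : (((n : Int) - i + 1 - 1) / 1).toNat = n - i := by omega
    rw [h2]
    apply List.ext_getElem (by simp)
    intro k h1 h3
    simp only [List.getElem_map, List.getElem_range, List.getElem_range']
    push_cast; ring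
  · rw [if_neg (by exact_mod_cast h)]
    have h1 : n - i = 0 := by omega
    simp [h1]

theorem pvInnerA_natCast (i : Nat) (ns : List Char) :
    pvInnerA (i : Int) ns =
      (List.range' i (ns.length - i)).foldl (fun ms j => pvStepN i j ms) ns := by
  unfold pvInnerA
  rw [PySem.List.len_eq, pvRange_cast, List.foldl_map]
  have he : (fun (ms : List Char) (j : Nat) =>
      if (PySem.List.pyGetD ms (i : Int) ' ').toNat > (PySem.List.pyGetD ms (j : Int) ' ').toNat then
        PySem.List.pySetD (PySem.List.pySetD ms (i : Int) (PySem.List.pyGetD ms (j : Int) ' ')) (j : Int)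
          (PySem.List.pyGetD ms (i : Int) ' ')
      else ms) = fun ms j => pvStepN i j ms := by
    funext ms j
    simp only [PySem.List.pyGetD_natCast, PySem.List.pySetD_natCast, pvStepN, gt_iff_lt]
  rw [he]

-- A's nested loops compute sorted(l)
theorem pvSortA_eq_sorted (l : List Char) :
    (PySem.List.pyRange 0 (PySem.List.len l)).foldl (fun ns i => pvInnerA i ns) l =
      PySem.List.sorted l (fun x => x) := by
  rw [PySem.List.len_eq, PySem.List.pyRange_zero_natCast, List.foldl_map]
  have he : (fun (ns : List Char) (i : Nat) => pvInnerA (i : Int) ns) =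
      fun ns i => (List.range' i (ns.length - i)).foldl (fun ms j => pvStepN i j ms) ns := by
    funext ns i; exact pvInnerA_natCast i ns
  rw [he, List.range_eq_range']
  have h0 : List.range' 0 l.length = List.range' 0 (l.length - 0) := by simp
  rw [h0]
  obtain ⟨hperm, hsort⟩ := pvOuter_go l l.length 0 l (by omega) (List.Perm.refl l)
    (fun p q _ _ hp => by omega)
  set r := (List.range' 0 (l.length - 0)).foldl
      (fun ns i => (List.range' i (ns.length - i)).foldl (fun ms j => pvStepN i j ms) ns) l with hr
  have hpw : r.Pairwise (· ≤ ·) := by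
    rw [List.pairwise_iff_getElem]
    intro a b ha hb hab
    have := hsort a b hab hb
    rw [List.getD_eq_getElem _ _ ha, List.getD_eq_getElem _ _ hb] at this
    exact Char.le_def.mpr this
  exact (PySem.List.sorted_id_eq_of_perm_of_pairwise l r hperm hpw).symm

-- B: the expansion of nodup buckets counts exactly
theorem pvCountExpand (ks : List Char) (f : Char → Nat) (hnd : ks.Nodup) (a : Char) :
    (ks.flatMap fun c => List.replicate (f c) c).count a = if a ∈ ks then f a else 0 := by
  induction ks with
  | nil => simp
  | cons c ks ih =>
    simp only [List.flatMap_cons, List.count_append, List.count_replicate]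
    rw [ih hnd.of_cons]
    by_cases h : a = c
    · subst h
      have : a ∉ ks := (List.nodup_cons.mp hnd).1
      simp [this]
    · simp [h, Ne.symm h, List.mem_cons]

-- B: expanding strictly increasing buckets is in order
theorem pvPairwiseExpand (ks : List Char) (f : Char → Nat) (h : ks.Pairwise (· < ·)) :
    (ks.flatMap fun c => List.replicate (f c) c).Pairwise (· ≤ ·) := by
  induction ks with
  | nil => simp
  | cons c ks ih =>
    simp only [List.flatMap_cons]
    rw [List.pairwise_append]
    refine ⟨List.pairwise_replicate.mpr (Or.inr le_rfl), ih h.of_cons, ?_⟩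
    intro x hx y hy
    rw [List.eq_of_mem_replicate hx]
    obtain ⟨c', hc', hy'⟩ := List.mem_flatMap.mp hy
    rw [List.eq_of_mem_replicate hy']
    exact le_of_lt (List.rel_of_pairwise_cons h hc')

-- B's counting expansion computes sorted(l)
theorem pvSortB_eq_sorted (l : List Char) :
    ((PySem.List.sorted (PySem.Set.ofList l) (fun c => c)).flatMap
        fun c => List.replicate (l.count c) c) =
      PySem.List.sorted l (fun x => x) := by
  set ks := PySem.List.sorted (PySem.Set.ofList l) (fun c => c) with hks
  have hperm : ks.Perm (PySem.Set.ofList l) := PySem.List.sorted_perm _ _ _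
  have hnd : ks.Nodup := hperm.nodup_iff.mpr (PySem.Set.nodup_ofList l)
  have hmem : ∀ a, a ∈ ks ↔ a ∈ l := by
    intro a
    rw [hperm.mem_iff, PySem.Set.mem_ofList]
  have hpl : ks.Pairwise (· < ·) := PySem.List.sorted_ofList_pairwise_lt l
  apply (PySem.List.sorted_id_eq_of_perm_of_pairwise l _ ?_ (pvPairwiseExpand ks _ hpl)).symm
  rw [List.perm_iff_count]
  intro a
  rw [pvCountExpand ks _ hnd a]
  by_cases h : a ∈ l
  · simp [hmem, h]
  · simp [hmem, h, List.count_eq_zero_of_not_mem h]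

-- the dict built by "counts[c] = counts.get(c, 0) + 1" is the counter
theorem pvCounts_eq (l : List Char) :
    l.foldl (fun d c => d.insert c (d.getD c 0 + 1)) PySem.Dict.empty = PySem.Dict.counter l := by
  rfl

-- ===== VERDICT (by name: the statement is the Claim_ definition above) =====
theorem sort_choice_letters_spec : Claim_equal_sort_choice_letters := by
  intro s _
  unfold Spec_sort_choice_letters sort_choice_letters sort_choice_letters_alt
  simp only [pvNums_eq s, pvCheckA_eq, pvCounts_eq]
  by_cases h : s.toList.all (fun c => PySem.Chars.isdigit c || PySem.Chars.isalpha c)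
  · rw [if_pos h, if_pos h, pvSortA_eq_sorted]
    congr 1
    rw [PySem.Dict.keys_counter, PySem.List.foldl_append_singleton_eq_map, List.nil_append,
      ← pvSortB_eq_sorted s.toList, List.flatMap_def]
    congr 1
    apply List.map_congr_left
    intro c _
    rw [PySem.Dict.getD_counter, Int.toNat_natCast]
  · rw [if_neg h, if_neg h]
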